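-- pv_equiv track=rewrite | github.com/pherapont/advent-of-code-2024-python | day11/strange_stones.py | transform_stones
-- ===== SOURCE A (Python) =====
-- def transform_stones(stones: tuple[str], blinks: int) -> list[str]:
--     """
--     1) If the stone is engraved with the number 0, it is replaced by a stone engraved with the number 1.
--     2) If the stone is engraved with a number that has an even number of digits,
--         it is replaced by two stones.
--         The left half of the digits are engraved on the new left stone,
--         and the right half of the digits are engraved on the new right stone.
--         (The new numbers don't keep extra leading zeroes: 1000 would become stones 10 and 0.)
--     3) If none of the other rules apply, the stone is replaced by a new stone;
--         the old stone's number multiplied by 2024 is engraved on the new stone.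
--     """
--     new_stones = list(stones)
--     for bl in range(blinks):
--         prev_stones = new_stones.copy()
--         new_stones = []
--         for stone in prev_stones:
--             if stone == "0":
--                 new_stones.append("1")
--             elif len(stone) and not len(stone) % 2:
--                 mid = len(stone) // 2
--                 first = stone[:mid]
--                 new_stones.append(first)
--                 # отбрасывание передних незначачих нулей
--                 last = str(int(stone[mid:]))
--                 new_stones.append(last)
--             else:
--                 new_stone = str(int(stone) * 2024)
--                 new_stones.append(new_stone)
--     return new_stones
-- ===== SOURCE B (Python) =====
-- def transform_stones(stones, blinks):
--     # Depth-first per-stone recursion instead of A's layer-by-layer list rebuild.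
--     def step(stone):
--         if stone == "0":
--             return ["1"]
--         if len(stone) and not len(stone) % 2:
--             mid = len(stone) // 2
--             return [stone[:mid], str(int(stone[mid:]))]
--         return [str(int(stone) * 2024)]
--
--     def expand(stone, n):
--         if n <= 0:
--             return [stone]
--         out = []
--         for child in step(stone):
--             out.extend(expand(child, n - 1))
--         return out
--
--     result = []
--     for s in stones:
--         result.extend(expand(s, blinks))
--     return result
-- ===== Notes on version B (the rewrite author's own statement) =====
-- stated objective: alternative
-- what changed: Replaces A's breadth-first blink-by-blink rebuild of the whole stone list with a depth-first recursion expand(stone, n) that fully expands each stone before moving to the next, concatenating results in order.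
-- outside the precondition, e.g. on transform_stones((' 7 ',), 1): A returns ['14168'], B returns ['14168']
import Mathlib
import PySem

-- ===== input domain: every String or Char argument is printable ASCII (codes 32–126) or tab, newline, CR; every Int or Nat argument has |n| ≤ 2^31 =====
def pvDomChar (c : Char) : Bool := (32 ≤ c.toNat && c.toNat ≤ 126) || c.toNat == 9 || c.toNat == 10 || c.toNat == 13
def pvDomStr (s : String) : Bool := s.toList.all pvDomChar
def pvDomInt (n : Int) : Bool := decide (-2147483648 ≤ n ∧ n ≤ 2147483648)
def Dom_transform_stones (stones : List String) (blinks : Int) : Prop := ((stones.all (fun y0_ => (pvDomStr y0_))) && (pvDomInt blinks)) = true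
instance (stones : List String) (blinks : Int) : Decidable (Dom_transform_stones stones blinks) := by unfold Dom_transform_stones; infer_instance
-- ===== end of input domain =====

-- B replaces A's layer-by-layer list rebuild with depth-first per-stone recursion (alternative decomposition, same result).

-- ===== PORT A =====
-- A's inner loop body: append one or two new stones for this stone.
-- 'int(...)' is PySem.Int.ofStr?; where Python raises ValueError (excluded by Pre_) the port uses .getD 0.
def pvStepA (acc : List String) (stone : String) : List String :=
  if stone == "0" then acc ++ ["1"]
  else if (PySem.Str.len stone != 0) && (PySem.Str.len stone % 2 == 0) then
    let mid : Int := PySem.Int.floordiv (PySem.Str.len stone) 2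
    let first := PySem.Str.slice stone none (some mid)
    let last := PySem.Int.toStr ((PySem.Int.ofStr? (PySem.Str.slice stone (some mid) none)).getD 0)
    (acc ++ [first]) ++ [last]
  else acc ++ [PySem.Int.toStr ((PySem.Int.ofStr? stone).getD 0 * 2024)]

def transform_stones (stones : List String) (blinks : Int) : List String :=
  (PySem.List.pyRange 0 blinks 1).foldl (fun new_stones _bl => new_stones.foldl pvStepA []) stones

-- ===== PORT B =====
-- the single-stone rule ('step' in Source B)
def pvRule (stone : String) : List String :=
  if stone == "0" then ["1"]
  else if (PySem.Str.len stone != 0) && (PySem.Str.len stone % 2 == 0) then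
    let mid : Int := PySem.Int.floordiv (PySem.Str.len stone) 2
    [PySem.Str.slice stone none (some mid),
     PySem.Int.toStr ((PySem.Int.ofStr? (PySem.Str.slice stone (some mid) none)).getD 0)]
  else [PySem.Int.toStr ((PySem.Int.ofStr? stone).getD 0 * 2024)]

-- 'expand(stone, n)' in Source B ('n <= 0' base case realised by the Nat recursion on blinks.toNat)
def pvExpand (stone : String) : Nat → List String
  | 0 => [stone]
  | n + 1 => (pvRule stone).foldl (fun out child => out ++ pvExpand child n) []

def transform_stones_alt (stones : List String) (blinks : Int) : List String :=
  stones.foldl (fun result s => result ++ pvExpand s blinks.toNat) []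

-- ===== PRECONDITION & SPEC =====
-- Pre_ narrows (when blinks > 0) to stones that are nonempty digit strings — the function's natural domain:
-- on other strings A raises ValueError on this or a later blink (e.g. ['-1'] with 2 blinks) unless int() happens
-- to parse every iterated slice, a property of deep iterates with no closed form; A still returns on some excluded
-- inputs such as ([' 7 '], 1), where B returns the same value.
def Pre_transform_stones (stones : List String) (blinks : Int) : Prop :=
  blinks ≤ 0 ∨ stones.all (fun s => PySem.Str.strIsdigit s) = true
instance (stones : List String) (blinks : Int) : Decidable (Pre_transform_stones stones blinks) := by
  unfold Pre_transform_stones; infer_instance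
def pvWitness_transform_stones : List String × Int := (["0", "1000"], 2)

def Spec_transform_stones (stones : List String) (blinks : Int) (out : List String) : Prop := out = transform_stones_alt stones blinks
instance (stones : List String) (blinks : Int) (out : List String) : Decidable (Spec_transform_stones stones blinks out) := by unfold Spec_transform_stones; infer_instance

-- ===== CLAIM (what is proved, stated in full; the proofs are below) =====
def Claim_equal_transform_stones : Prop := ∀ (stones : List String) (blinks : Int), Dom_transform_stones stones blinks → Pre_transform_stones stones blinks → Spec_transform_stones stones blinks (transform_stones stones blinks)

-- ===== LEMMAS AND PROOFS =====

theorem pvStepA_eq (acc : List String) (stone : String) :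
    pvStepA acc stone = acc ++ pvRule stone := by
  unfold pvStepA pvRule
  split_ifs <;> simp

theorem pvBlinkA_eq (xs : List String) :
    xs.foldl pvStepA [] = xs.flatMap pvRule := by
  have h : pvStepA = fun acc s => acc ++ pvRule s := by
    funext acc s; exact pvStepA_eq acc s
  rw [h]
  simpa using PySem.List.foldl_append_eq_flatMap pvRule xs []

theorem pvExpand_succ (stone : String) (n : Nat) :
    pvExpand stone (n + 1) = (pvRule stone).flatMap (fun c => pvExpand c n) := by
  show (pvRule stone).foldl (fun out child => out ++ pvExpand child n) [] = _
  simpa using PySem.List.foldl_append_eq_flatMap (fun c => pvExpand c n) (pvRule stone) []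

theorem pvIter_eq (l : List Int) (xs : List String) :
    l.foldl (fun new_stones _bl => new_stones.foldl pvStepA []) xs
      = xs.flatMap (fun s => pvExpand s l.length) := by
  induction l generalizing xs with
  | nil => simp [pvExpand]
  | cons a l ih =>
      simp only [List.foldl_cons, List.length_cons]
      rw [ih (xs.foldl pvStepA []), pvBlinkA_eq]
      rw [List.flatMap_assoc]
      refine List.flatMap_congr ?_
      intro s _
      exact (pvExpand_succ s l.length).symm

theorem transform_stones_eq (stones : List String) (blinks : Int) :
    transform_stones stones blinks = transform_stones_alt stones blinks := by
  unfold transform_stones transform_stones_alt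
  rw [pvIter_eq, PySem.List.length_pyRange_one]
  rw [show (blinks - 0).toNat = blinks.toNat by omega]
  simpa using (PySem.List.foldl_append_eq_flatMap (fun s => pvExpand s blinks.toNat) stones []).symm

-- ===== VERDICT (by name: the statement is the Claim_ definition above) =====
theorem transform_stones_spec : Claim_equal_transform_stones := by
  intro stones blinks _ _
  exact transform_stones_eq stones blinks
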